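-- pv_equiv track=rewrite | github.com/nathanvc/MathForParents | Vitamin_SimFns.py | chooseone_nice
-- ===== SOURCE A (Python) =====
-- def findincludes(s, ch):
--     return [i for i, ltr in enumerate(s) if ch in str(ltr)]
--
-- def chooseone_nice(select, select_ind, type_pref, child):
--
--     # identify preferred vitamins for each kid
--     pref = []
--     for c in range(len(type_pref)):
--         pref.append(findincludes(select, type_pref[c]))
--
--     #non preferred vitamins in offered vitamins
--     npref = [s for s in range(len(select)) if s not in pref[child]]
--
--     # make list of vitamins preferred by other children
--     otherpref = []
--     otherkids = list(range(len(type_pref)))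
--     del(otherkids[child])
--     for c in otherkids:
--         otherpref = otherpref + pref[c]
--
--     # list of preferred vitamins that are not also preferred by other children
--     pref_restr=[a for a in pref[child] if a not in otherpref]
--
--     # Make choice
--     if pref_restr: # choose first from vits sibling does not prefer
--         choice = pref_restr[0]
--         happy = 1 # child happy
--     elif not pref_restr:
--         if pref[child]: # choose second from own preferences, even if in conflict with sibling
--             choice = pref[child][0]
--             happy = 1 # child happy
--         if not pref[child]:
--             choice = npref[0] #choose first non-optimal choice
--             happy = 0 # child not happy
--
--     # identity of chosen vitamin
--     ch_vit = select[choice]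
--     ch_ind = select_ind[choice]
--
--     # remove chosen vitamin and return
--     del(select[choice])
--     del(select_ind[choice])
--
--     return(select, select_ind, ch_vit, ch_ind, happy)
-- ===== SOURCE B (Python) =====
-- # Like A, mutates select/select_ind in place (del of the chosen index).
-- def chooseone_nice(select, select_ind, type_pref, child):
--     mypref = type_pref[child]
--     sibs = list(type_pref)
--     del sibs[child]
--
--     # indices of vitamins any sibling prefers
--     otherpref = {i for p in sibs for i, v in enumerate(select) if p in v}
--
--     # one pass: first preferred-and-unconflicted, first preferred, first non-preferred
--     first_restr = first_pref = first_npref = None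
--     for i, v in enumerate(select):
--         if mypref in v:
--             if first_pref is None:
--                 first_pref = i
--             if first_restr is None and i not in otherpref:
--                 first_restr = i
--         elif first_npref is None:
--             first_npref = i
--
--     if first_restr is not None:
--         choice, happy = first_restr, 1
--     elif first_pref is not None:
--         choice, happy = first_pref, 1
--     else:
--         choice, happy = first_npref, 0
--
--     ch_vit = select[choice]
--     ch_ind = select_ind[choice]
--     del select[choice]
--     del select_ind[choice]
--     return (select, select_ind, ch_vit, ch_ind, happy)
-- ===== Notes on version B (the rewrite author's own statement) =====
-- stated objective: faster
-- what changed: A builds per-child preference index lists, a non-preferred list, a concatenated sibling-preference list and a restricted list and takes their heads, with linear 'in'-scans over those lists; B looks up the child's own preference and the sibling list directly, builds one hash set of sibling-preferred indices and makes a single pass over the candidates maintaining three running first-match indices (first preferred-and-unconflicted, first preferred, first non-preferred).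
-- outside the precondition, e.g. on chooseone_nice(['a', 'b'], [1], ['a'], 0): A returns (['b'], [], 'a', 1, 1), B returns (['b'], [], 'a', 1, 1)
import Mathlib
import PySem

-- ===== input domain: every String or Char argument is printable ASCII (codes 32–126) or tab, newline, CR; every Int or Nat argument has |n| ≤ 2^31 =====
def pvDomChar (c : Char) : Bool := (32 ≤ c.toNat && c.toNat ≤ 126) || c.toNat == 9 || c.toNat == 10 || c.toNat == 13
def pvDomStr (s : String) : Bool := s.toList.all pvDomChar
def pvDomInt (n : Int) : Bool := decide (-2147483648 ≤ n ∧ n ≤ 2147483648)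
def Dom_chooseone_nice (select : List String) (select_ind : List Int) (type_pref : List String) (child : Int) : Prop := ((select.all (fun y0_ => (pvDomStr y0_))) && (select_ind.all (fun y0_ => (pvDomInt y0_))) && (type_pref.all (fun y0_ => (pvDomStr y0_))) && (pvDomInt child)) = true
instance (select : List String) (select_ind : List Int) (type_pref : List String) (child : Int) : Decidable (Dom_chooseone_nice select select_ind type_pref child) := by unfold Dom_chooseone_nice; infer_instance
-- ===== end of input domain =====

-- B replaces A's per-child preference lists, non-preferred list and restricted list (with their
-- linear 'in'-scans) by one sibling-preference set plus a single first-match scan (measured faster).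
-- Equivalence is about the returned 5-tuple; the Python versions both also mutate
-- select/select_ind in place (the same del of the chosen index).
-- ===== PORT A =====
-- shared epilogue: both Pythons end with the same four lines
--   ch_vit = select[choice]; ch_ind = select_ind[choice]; del select[choice]; del select_ind[choice]
-- (none anywhere = the corresponding IndexError, excluded by Pre_)
def pvFinish (select : List String) (select_ind : List Int) (cho : Option (Int × Int)) :
    List String × List Int × String × Int × Int :=
  match cho with
  | none => ([], [], "", 0, 0)
  | some (choice, happy) =>
    match PySem.List.pyGet? select choice, PySem.List.pyGet? select_ind choice,
          PySem.List.pop? select choice, PySem.List.pop? select_ind choice with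
    | some v, some ix, some (_, s'), some (_, i') => (s', i', v, ix, happy)
    | _, _, _, _ => ([], [], "", 0, 0)

def findincludes (s : List String) (ch : String) : List Int :=
  ((PySem.List.enumerate s).filter (fun p => PySem.Str.isIn ch p.2)).map (fun p => p.1)

def chooseone_nice (select : List String) (select_ind : List Int) (type_pref : List String) (child : Int) :
    List String × List Int × String × Int × Int :=
  let pref : List (List Int) :=
    (PySem.List.pyRange 0 (type_pref.length : Int) 1).foldl
      (fun acc c => acc ++ [findincludes select (PySem.List.pyGetD type_pref c "")]) []
  match PySem.List.pyGet? pref child with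
  | none => ([], [], "", 0, 0)                      -- IndexError pref[child]
  | some prefChild =>
    let npref : List Int :=
      (PySem.List.pyRange 0 (select.length : Int) 1).filter (fun s => !(prefChild.contains s))
    match PySem.List.pop? (PySem.List.pyRange 0 (type_pref.length : Int) 1) child with
    | none => ([], [], "", 0, 0)                    -- IndexError del otherkids[child]
    | some (_, otherkids) =>
      let otherpref : List Int :=
        otherkids.foldl (fun acc c => acc ++ PySem.List.pyGetD pref c []) []
      let pref_restr : List Int := prefChild.filter (fun a => !(otherpref.contains a))
      let cho : Option (Int × Int) :=
        match pref_restr with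
        | a :: _ => some (a, 1)
        | [] =>
          match prefChild with
          | a :: _ => some (a, 1)
          | [] =>
            match npref with
            | a :: _ => some (a, 0)
            | [] => none                            -- IndexError npref[0]
      pvFinish select select_ind cho

-- ===== PORT B =====
def chooseone_nice_alt (select : List String) (select_ind : List Int) (type_pref : List String) (child : Int) :
    List String × List Int × String × Int × Int :=
  match PySem.List.pyGet? type_pref child with
  | none => ([], [], "", 0, 0)                      -- IndexError type_pref[child]
  | some mypref =>
    match PySem.List.pop? type_pref child with
    | none => ([], [], "", 0, 0)                    -- IndexError del sibs[child]
    | some (_, sibs) =>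
      let otherpref : PySem.Set Int :=
        sibs.foldl (fun acc p =>
          (PySem.List.enumerate select).foldl (fun acc2 iv =>
            if PySem.Str.isIn p iv.2 then PySem.Set.add acc2 iv.1 else acc2) acc) PySem.Set.empty
      let st : Option Int × Option Int × Option Int :=
        (PySem.List.enumerate select).foldl
          (fun st iv =>
            if PySem.Str.isIn mypref iv.2 then
              ((if st.1 = none ∧ ¬ (PySem.Set.contains otherpref iv.1 = true) then some iv.1 else st.1),
               (if st.2.1 = none then some iv.1 else st.2.1),
               st.2.2)
            else if st.2.2 = none then (st.1, st.2.1, some iv.1) else st)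
          (none, none, none)
      let cho : Option (Int × Int) :=
        match st.1 with
        | some c => some (c, 1)
        | none =>
          match st.2.1 with
          | some c => some (c, 1)
          | none =>
            match st.2.2 with
            | some c => some (c, 0)
            | none => none                          -- select empty: select[None] raises
      pvFinish select select_ind cho

-- ===== PRECONDITION & SPEC =====
-- Pre_ excludes: child out of Python's index range for type_pref (A raises IndexError), empty
-- select with no preferred vitamin (A raises IndexError on npref[0]; 0 < len select covers it),
-- and select_ind shorter than select — there A raises IndexError unless the chosen index happens
-- to be small; stating exactly which index is chosen would re-simulate the algorithm, so this
-- slightly narrows (see claim cites: on such inputs where A does return, B returns the same value).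
def Pre_chooseone_nice (select : List String) (select_ind : List Int) (type_pref : List String) (child : Int) : Prop :=
  0 < select.length ∧ select.length ≤ select_ind.length ∧
  -(type_pref.length : Int) ≤ child ∧ child < (type_pref.length : Int)
instance (select : List String) (select_ind : List Int) (type_pref : List String) (child : Int) : Decidable (Pre_chooseone_nice select select_ind type_pref child) := by unfold Pre_chooseone_nice; infer_instance

def pvWitness_chooseone_nice : List String × List Int × List String × Int := (["a", "b"], [1, 2], ["a", "x"], 0)

def Spec_chooseone_nice (select : List String) (select_ind : List Int) (type_pref : List String) (child : Int) (out : List String × List Int × String × Int × Int) : Prop := out = chooseone_nice_alt select select_ind type_pref child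
instance (select : List String) (select_ind : List Int) (type_pref : List String) (child : Int) (out : List String × List Int × String × Int × Int) : Decidable (Spec_chooseone_nice select select_ind type_pref child out) := by unfold Spec_chooseone_nice; infer_instance

-- ===== CLAIM (what is proved, stated in full; the proofs are below) =====
def Claim_equal_chooseone_nice : Prop := ∀ (select : List String) (select_ind : List Int) (type_pref : List String) (child : Int), Dom_chooseone_nice select select_ind type_pref child → Pre_chooseone_nice select select_ind type_pref child → Spec_chooseone_nice select select_ind type_pref child (chooseone_nice select select_ind type_pref child)

-- ===== LEMMAS AND PROOFS =====

theorem pvEmod_inrange (i L k : Int) (h1 : -L ≤ i) (h2 : i < L) (hmk : i % L = k) :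
    (0 ≤ i ∧ k = i) ∨ (i < 0 ∧ k = i + L) := by
  by_cases h : 0 ≤ i
  · left; exact ⟨h, by rw [← hmk, Int.emod_eq_of_lt h h2]⟩
  · right
    refine ⟨by omega, ?_⟩
    have e : i % L = (i + L) % L := (Int.add_emod_right i L).symm
    rw [← hmk, e, Int.emod_eq_of_lt (by omega) (by omega)]

theorem pvIdx_inrange {α : Type} (xs : List α) (i : Int) (k : Nat) (h1 : -(xs.length:Int) ≤ i) (h2 : i < (xs.length:Int))
    (_hk : k < xs.length) (hmk : i % (xs.length:Int) = (k:Int)) :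
    PySem.List.pyIdx? xs.length i = some k := by
  have hc := pvEmod_inrange i (xs.length:Int) (k:Int) h1 h2 hmk
  unfold PySem.List.pyIdx?
  by_cases h : 0 ≤ i
  · simp only [if_pos h, if_pos h2]; congr 1; omega
  · rw [if_neg h, if_pos h1]; congr 1; omega

theorem pvPyGet_inrange {α : Type} (xs : List α) (i : Int) (k : Nat) (h1 : -(xs.length:Int) ≤ i) (h2 : i < (xs.length:Int))
    (hk : k < xs.length) (hmk : i % (xs.length:Int) = (k:Int)) :
    PySem.List.pyGet? xs i = some xs[k] := by
  have hc := pvEmod_inrange i (xs.length:Int) (k:Int) h1 h2 hmk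
  by_cases h : 0 ≤ i
  · rw [PySem.List.pyGet?_eq_some_getElem xs h h2]
    simp only [show i.toNat = k from by omega]
  · have hi : i = -(((-i).toNat : Nat) : Int) := by omega
    rw [hi, PySem.List.pyGet?_neg_natCast xs _ (by omega) (by omega)]
    rw [List.getElem?_eq_getElem (by omega)]
    simp only [show xs.length - (-i).toNat = k from by omega]

theorem pvPop_inrange {α : Type} (xs : List α) (i : Int) (k : Nat) (h1 : -(xs.length:Int) ≤ i) (h2 : i < (xs.length:Int))
    (hk : k < xs.length) (hmk : i % (xs.length:Int) = (k:Int)) :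
    PySem.List.pop? xs i = some (xs[k], xs.eraseIdx k) := by
  unfold PySem.List.pop?
  rw [pvIdx_inrange xs i k h1 h2 hk hmk]
  simp [List.getElem?_eq_getElem hk]

theorem findincludes_eq (s : List String) (ch : String) :
    findincludes s ch = (PySem.List.pyRange 0 (s.length : Int) 1).filter
      (fun i => PySem.Str.isIn ch (PySem.List.pyGetD s i "")) := by
  unfold findincludes
  rw [PySem.List.enumerate_eq_map_pyRange s ""]
  rw [List.filter_map, List.map_map]
  simp only [Function.comp_def, PySem.List.len]
  rw [List.map_id']

-- erase in the middle
theorem pvErase_mid {α : Type} (A B : List α) (x : α) : (A ++ x :: B).eraseIdx A.length = A ++ B := by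
  induction A with
  | nil => simp
  | cons a t ih => simp [ih]

theorem pvErase_mid' {α : Type} (A B : List α) (x : α) (k : Nat) (h : A.length = k) :
    (A ++ x :: B).eraseIdx k = A ++ B := by
  rw [← h]; exact pvErase_mid A B x

-- membership in the conditional-add inner loop
theorem pvMem_condAdd (l : List Int) (q : Int → Bool) (s : PySem.Set Int) (y : Int) :
    (y ∈ l.foldl (fun s i => if q i then PySem.Set.add s i else s) s) ↔ y ∈ s ∨ (y ∈ l ∧ q y) := by
  rw [PySem.List.foldl_if_eq_foldl_filter]
  rw [PySem.Set.mem_foldl_add (l.filter q) (fun b => b) s y]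
  simp only [List.mem_filter]
  constructor
  · rintro (h | ⟨b, ⟨hb, hq⟩, rfl⟩)
    · exact Or.inl h
    · exact Or.inr ⟨hb, hq⟩
  · rintro (h | ⟨hb, hq⟩)
    · exact Or.inl h
    · exact Or.inr ⟨y, ⟨hb, hq⟩, rfl⟩

-- membership in B's sibling-set double loop
theorem pvMem_setB {α : Type} (sibs : List α) (r : List Int) (q : α → Int → Bool)
    (acc : PySem.Set Int) (y : Int) :
    (y ∈ sibs.foldl (fun acc p => r.foldl (fun acc2 i =>
        if q p i then PySem.Set.add acc2 i else acc2) acc) acc)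
    ↔ y ∈ acc ∨ ∃ p ∈ sibs, y ∈ r ∧ q p y := by
  induction sibs generalizing acc with
  | nil => simp
  | cons p t ih =>
    rw [List.foldl_cons, ih, pvMem_condAdd]
    simp only [List.mem_cons]
    constructor
    · rintro ((h | ⟨hr, hq⟩) | ⟨p', hp', rest⟩)
      · exact Or.inl h
      · exact Or.inr ⟨p, Or.inl rfl, hr, hq⟩
      · exact Or.inr ⟨p', Or.inr hp', rest⟩
    · rintro (h | ⟨p', (rfl | hp'), hr, hq⟩)
      · exact Or.inl (Or.inl h)
      · exact Or.inl (Or.inr ⟨hr, hq⟩)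
      · exact Or.inr ⟨p', hp', hr, hq⟩

def pvFirst (o x : Option Int) : Option Int :=
  match o with
  | some a => some a
  | none => x

theorem pvScan_eq (l : List Int) (P C : Int → Bool) (fr fp fn : Option Int) :
    l.foldl (fun st i =>
      if P i then
        ((if st.1 = none ∧ ¬ (C i = true) then some i else st.1),
         (if st.2.1 = none then some i else st.2.1),
         st.2.2)
      else if st.2.2 = none then (st.1, st.2.1, some i) else st) (fr, fp, fn)
    = (pvFirst fr ((l.filter (fun i => P i && !C i)).head?),
       pvFirst fp ((l.filter P).head?),
       pvFirst fn ((l.filter (fun i => !P i)).head?)) := by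
  induction l generalizing fr fp fn with
  | nil => cases fr <;> cases fp <;> cases fn <;> rfl
  | cons a t ih =>
    rw [List.foldl_cons]
    by_cases hP : P a = true
    · have hstep : (if P a then
          ((if (fr, fp, fn).1 = none ∧ ¬ (C a = true) then some a else (fr, fp, fn).1),
           (if (fr, fp, fn).2.1 = none then some a else (fr, fp, fn).2.1),
           (fr, fp, fn).2.2)
        else if (fr, fp, fn).2.2 = none then ((fr, fp, fn).1, (fr, fp, fn).2.1, some a) else (fr, fp, fn))
        = ((if fr = none ∧ ¬ (C a = true) then some a else fr),
           (if fp = none then some a else fp), fn) := by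
        simp [hP]
      rw [hstep, ih]
      by_cases hC : C a = true <;> cases fr <;> cases fp <;> cases fn <;>
        simp [pvFirst, hP, hC]
    · have hstep : (if P a then
          ((if (fr, fp, fn).1 = none ∧ ¬ (C a = true) then some a else (fr, fp, fn).1),
           (if (fr, fp, fn).2.1 = none then some a else (fr, fp, fn).2.1),
           (fr, fp, fn).2.2)
        else if (fr, fp, fn).2.2 = none then ((fr, fp, fn).1, (fr, fp, fn).2.1, some a) else (fr, fp, fn))
        = (fr, fp, (if fn = none then some a else fn)) := by
        cases fn <;> simp [hP]
      rw [hstep, ih]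
      cases fr <;> cases fp <;> cases fn <;>
        simp [pvFirst, hP]

theorem chooseone_nice_spec : Claim_equal_chooseone_nice := by
  intro select select_ind type_pref child _hDom hPre
  obtain ⟨hn, hsi, hc1, hc2⟩ := hPre
  unfold Spec_chooseone_nice
  have hL : 0 < type_pref.length := by omega
  have hLpos : (0:Int) < (type_pref.length : Int) := by omega
  have h0 : 0 ≤ child % (type_pref.length : Int) := Int.emod_nonneg child (by omega)
  set k : Nat := (child % (type_pref.length : Int)).toNat with hkdef
  have hmk : child % (type_pref.length : Int) = (k : Int) := (Int.toNat_of_nonneg h0).symm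
  have hkL : k < type_pref.length := by
    have := Int.emod_lt_of_pos child hLpos
    omega
  -- shared abbreviations
  have hfmap : (PySem.List.pyRange 0 (type_pref.length:Int) 1).map
      (fun c => findincludes select (PySem.List.pyGetD type_pref c ""))
      = type_pref.map (findincludes select) := by
    have h1 : (fun c => findincludes select (PySem.List.pyGetD type_pref c "")) =
        (findincludes select) ∘ (fun c => PySem.List.pyGetD type_pref c "") := rfl
    rw [h1, ← List.map_map, PySem.List.map_pyGetD_pyRange_zero']
  have hA1 : PySem.List.pyGet? (type_pref.map (findincludes select)) child
      = some (findincludes select type_pref[k]) := by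
    have h := pvPyGet_inrange (type_pref.map (findincludes select)) child k
      (by simp; omega) (by simp; omega) (by simp [hkL]) (by simp [hmk])
    rw [h, List.getElem_map]
  have hlenr : (PySem.List.pyRange 0 (type_pref.length:Int) 1).length = type_pref.length := by
    rw [PySem.List.length_pyRange_one]; omega
  have hsplit : PySem.List.pyRange 0 (type_pref.length:Int) 1
      = PySem.List.pyRange 0 (k:Int) 1 ++ ((k:Int) :: PySem.List.pyRange ((k:Int)+1) (type_pref.length:Int) 1) := by
    have h1 : PySem.List.pyRange (k:Int) (type_pref.length:Int) 1
        = (k:Int) :: PySem.List.pyRange ((k:Int)+1) (type_pref.length:Int) 1 :=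
      PySem.List.pyRange_one_cons (by omega)
    rw [PySem.List.pyRange_one_append 0 (k:Int) (type_pref.length:Int) (by omega) (by omega), h1]
  have herase : (PySem.List.pyRange 0 (type_pref.length:Int) 1).eraseIdx k
      = PySem.List.pyRange 0 (k:Int) 1 ++ PySem.List.pyRange ((k:Int)+1) (type_pref.length:Int) 1 := by
    have hlk : (PySem.List.pyRange 0 (k:Int) 1).length = k := by
      rw [PySem.List.length_pyRange_one]; omega
    rw [hsplit]
    exact pvErase_mid' _ _ _ _ hlk
  have hgetk : ∀ (hh : k < (PySem.List.pyRange 0 (type_pref.length:Int) 1).length),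
      (PySem.List.pyRange 0 (type_pref.length:Int) 1)[k]'hh = (k:Int) := by
    intro hh
    rw [PySem.List.getElem_pyRange_one]; omega
  have hA2 : PySem.List.pop? (PySem.List.pyRange 0 (type_pref.length:Int) 1) child
      = some ((k:Int), PySem.List.pyRange 0 (k:Int) 1 ++ PySem.List.pyRange ((k:Int)+1) (type_pref.length:Int) 1) := by
    have h := pvPop_inrange (PySem.List.pyRange 0 (type_pref.length:Int) 1) child k
      (by simp only [hlenr]; omega) (by simp only [hlenr]; omega)
      (by simp only [hlenr]; omega) (by simp only [hlenr]; exact_mod_cast hmk)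
    rw [h, hgetk, herase]
  -- B side: type_pref[child] and del sibs[child]
  have hB1 : PySem.List.pyGet? type_pref child = some type_pref[k] :=
    pvPyGet_inrange type_pref child k (by omega) (by omega) hkL hmk
  -- sibs = type_pref without index k, as a map over the other indices
  have hsibs_map : type_pref.eraseIdx k
      = (PySem.List.pyRange 0 (k:Int) 1 ++ PySem.List.pyRange ((k:Int)+1) (type_pref.length:Int) 1).map
          (fun c => PySem.List.pyGetD type_pref c "") := by
    apply List.ext_getElem
    · simp [List.length_eraseIdx, hkL, PySem.List.length_pyRange_one]
      omega
    · intro j h1 h2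
      have hlk : (PySem.List.pyRange 0 (k:Int) 1).length = k := by
        rw [PySem.List.length_pyRange_one]; omega
      have hle : (type_pref.eraseIdx k).length = type_pref.length - 1 := by
        simp [List.length_eraseIdx, hkL]
      rw [List.getElem_map]
      by_cases hj : j < k
      · rw [List.getElem_append_left (by omega)]
        rw [PySem.List.getElem_pyRange_one]
        rw [PySem.List.pyGetD_eq_getElem _ _ (by omega) (by omega)]
        rw [List.getElem_eraseIdx_of_lt h1 hj]
        congr 1
        omega
      · rw [List.getElem_append_right (by omega)]
        rw [PySem.List.getElem_pyRange_one]
        rw [PySem.List.pyGetD_eq_getElem _ _ (by omega) (by omega)]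
        rw [List.getElem_eraseIdx_of_ge h1 (by omega)]
        congr 1
        omega
  have hB2 : PySem.List.pop? type_pref child = some (type_pref[k], type_pref.eraseIdx k) :=
    pvPop_inrange type_pref child k (by omega) (by omega) hkL hmk
  simp only [chooseone_nice, chooseone_nice_alt]
  rw [PySem.List.foldl_append_singleton_eq_map, List.nil_append, hfmap]
  simp only [hA1, hA2, hB1, hB2]
  -- turn B's enumerate folds into pyRange folds
  rw [PySem.List.enumerate_eq_map_pyRange select ""]
  simp only [List.foldl_map, PySem.List.len]
  rw [PySem.List.foldl_append_eq_flatMap, List.nil_append]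
  rw [hsibs_map]
  simp only [List.foldl_map]
  rw [pvScan_eq]
  simp only [show ∀ x : Option Int, pvFirst none x = x from fun _ => rfl]
  rw [findincludes_eq]
  set OA : List Int := List.flatMap (fun c => PySem.List.pyGetD (List.map (findincludes select) type_pref) c []) (PySem.List.pyRange 0 (k:Int) 1 ++ PySem.List.pyRange ((k:Int)+1) (type_pref.length:Int) 1) with hOAdef
  set OB : PySem.Set Int := List.foldl (fun acc c => List.foldl (fun acc2 i => if PySem.Str.isIn (PySem.List.pyGetD type_pref c "") (PySem.List.pyGetD select i "") = true then PySem.Set.add acc2 i else acc2) acc (PySem.List.pyRange 0 (select.length:Int) 1)) PySem.Set.empty (PySem.List.pyRange 0 (k:Int) 1 ++ PySem.List.pyRange ((k:Int)+1) (type_pref.length:Int) 1) with hOBdef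
  have hgd : ∀ c : Int, 0 ≤ c → c < (type_pref.length:Int) →
      PySem.List.pyGetD (List.map (findincludes select) type_pref) c []
        = findincludes select (PySem.List.pyGetD type_pref c "") := by
    intro c h0c h1c
    rw [PySem.List.pyGetD_eq_getElem _ _ h0c (by simpa using h1c),
        PySem.List.pyGetD_eq_getElem _ _ h0c h1c, List.getElem_map]
  have hrangeb : ∀ c : Int, c ∈ PySem.List.pyRange 0 (k:Int) 1 ++ PySem.List.pyRange ((k:Int)+1) (type_pref.length:Int) 1 →
      0 ≤ c ∧ c < (type_pref.length:Int) := by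
    intro c hc
    rcases List.mem_append.1 hc with h | h
    · have := PySem.List.mem_pyRange_one.1 h; omega
    · have := PySem.List.mem_pyRange_one.1 h; omega
  have hmemOA : ∀ y : Int, y ∈ OA ↔
      (∃ c ∈ PySem.List.pyRange 0 (k:Int) 1 ++ PySem.List.pyRange ((k:Int)+1) (type_pref.length:Int) 1,
        y ∈ PySem.List.pyRange 0 (select.length:Int) 1 ∧
        PySem.Str.isIn (PySem.List.pyGetD type_pref c "") (PySem.List.pyGetD select y "") = true) := by
    intro y
    rw [hOAdef, List.mem_flatMap]
    constructor
    · rintro ⟨c, hc, hy⟩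
      obtain ⟨h0c, h1c⟩ := hrangeb c hc
      rw [hgd c h0c h1c, findincludes_eq, List.mem_filter] at hy
      exact ⟨c, hc, hy.1, hy.2⟩
    · rintro ⟨c, hc, hyr, hq⟩
      obtain ⟨h0c, h1c⟩ := hrangeb c hc
      refine ⟨c, hc, ?_⟩
      rw [hgd c h0c h1c, findincludes_eq, List.mem_filter]
      exact ⟨hyr, hq⟩
  have hmemOB : ∀ y : Int, y ∈ OB ↔
      (∃ c ∈ PySem.List.pyRange 0 (k:Int) 1 ++ PySem.List.pyRange ((k:Int)+1) (type_pref.length:Int) 1,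
        y ∈ PySem.List.pyRange 0 (select.length:Int) 1 ∧
        PySem.Str.isIn (PySem.List.pyGetD type_pref c "") (PySem.List.pyGetD select y "") = true) := by
    intro y
    rw [hOBdef, pvMem_setB]
    simp only [PySem.Set.empty]
    constructor
    · rintro (h | ⟨c, hc, hyr, hq⟩)
      · simp at h
      · exact ⟨c, hc, hyr, hq⟩
    · rintro ⟨c, hc, hyr, hq⟩
      exact Or.inr ⟨c, hc, hyr, hq⟩
  have hcont : ∀ y : Int, OA.contains y = PySem.Set.contains OB y := by
    intro y
    rw [List.contains_eq_mem, PySem.Set.contains_eq_decide]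
    exact decide_eq_decide.2 ((hmemOA y).trans (hmemOB y).symm)
  rw [List.filter_filter]
  have e1 : List.filter
        (fun a => (!OA.contains a) && PySem.Str.isIn type_pref[k] (PySem.List.pyGetD select a ""))
        (PySem.List.pyRange 0 (select.length:Int) 1)
      = List.filter
        (fun i => PySem.Str.isIn type_pref[k] (PySem.List.pyGetD select i "") && !(PySem.Set.contains OB i))
        (PySem.List.pyRange 0 (select.length:Int) 1) := by
    apply List.filter_congr
    intro a _
    rw [hcont a, Bool.and_comm]
  have e2 : List.filter
        (fun s => !(List.filter (fun i => PySem.Str.isIn type_pref[k] (PySem.List.pyGetD select i ""))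
            (PySem.List.pyRange 0 (select.length:Int) 1)).contains s)
        (PySem.List.pyRange 0 (select.length:Int) 1)
      = List.filter (fun i => !(PySem.Str.isIn type_pref[k] (PySem.List.pyGetD select i "")))
        (PySem.List.pyRange 0 (select.length:Int) 1) := by
    apply List.filter_congr
    intro s hs
    rw [List.contains_eq_mem]
    simp [List.mem_filter, hs]
  rw [e1, e2]
  cases List.filter
      (fun i => PySem.Str.isIn type_pref[k] (PySem.List.pyGetD select i "") && !(PySem.Set.contains OB i))
      (PySem.List.pyRange 0 (select.length:Int) 1) <;>
    cases List.filter (fun i => PySem.Str.isIn type_pref[k] (PySem.List.pyGetD select i ""))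
      (PySem.List.pyRange 0 (select.length:Int) 1) <;>
    cases List.filter (fun i => !(PySem.Str.isIn type_pref[k] (PySem.List.pyGetD select i "")))
      (PySem.List.pyRange 0 (select.length:Int) 1) <;>
    rfl
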